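-- pv_equiv track=rewrite | github.com/OrgPele/envctl | python/envctl_engine/startup/service_bootstrap_domain.py | _rewrite_database_url_to_asyncpg
-- ===== SOURCE A (Python) =====
-- def _rewrite_database_url_to_asyncpg(database_url: str) -> str | None:
--     value = (database_url or "").strip()
--     if not value:
--         return None
--     if value.startswith("postgresql+asyncpg://"):
--         return value
--     replacements = (
--         ("postgresql+psycopg2://", "postgresql+asyncpg://"),
--         ("postgresql+psycopg://", "postgresql+asyncpg://"),
--         ("postgresql://", "postgresql+asyncpg://"),
--         ("postgres://", "postgresql+asyncpg://"),
--     )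
--     for source, target in replacements:
--         if value.startswith(source):
--             return target + value[len(source) :]
--     return None
-- ===== SOURCE B (Python) =====
-- _SCHEME_MAP = {
--     "postgresql+psycopg2": "postgresql+asyncpg",
--     "postgresql+psycopg": "postgresql+asyncpg",
--     "postgresql": "postgresql+asyncpg",
--     "postgres": "postgresql+asyncpg",
--     "postgresql+asyncpg": "postgresql+asyncpg",
-- }
--
--
-- def _rewrite_database_url_to_asyncpg(database_url):
--     value = (database_url or "").strip()
--     i = value.find("://")
--     if i < 0:
--         return None
--     target = _SCHEME_MAP.get(value[:i])
--     if target is None: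
--         return None
--     return target + "://" + value[i + 3:]
-- ===== Notes on version B (the rewrite author's own statement) =====
-- stated objective: simpler
-- what changed: Replaces the early asyncpg passthrough plus the ordered prefix-scan loop over replacement pairs with a single search for the scheme separator, one dict lookup of the scheme (asyncpg maps to itself), and one reassembly of the URL.
import Mathlib
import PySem

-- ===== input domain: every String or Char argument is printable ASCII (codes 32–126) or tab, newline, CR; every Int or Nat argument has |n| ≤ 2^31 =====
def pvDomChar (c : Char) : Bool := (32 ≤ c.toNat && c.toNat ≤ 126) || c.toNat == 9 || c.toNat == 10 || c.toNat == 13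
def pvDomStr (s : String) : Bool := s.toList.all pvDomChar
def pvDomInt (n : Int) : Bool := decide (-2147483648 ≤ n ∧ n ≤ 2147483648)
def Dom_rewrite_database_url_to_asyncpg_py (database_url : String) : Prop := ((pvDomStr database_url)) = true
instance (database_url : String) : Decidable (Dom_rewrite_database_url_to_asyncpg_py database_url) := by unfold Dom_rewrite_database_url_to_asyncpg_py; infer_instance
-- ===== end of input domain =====

-- B replaces A's asyncpg passthrough plus ordered prefix-scan over replacement pairs with a
-- single search for the scheme separator, one dict lookup of the scheme (asyncpg maps to
-- itself), and one reassembly of the URL (objective: simpler).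

-- ===== PORT A =====
def pvReplacements : List (String × String) :=
  [("postgresql+psycopg2://", "postgresql+asyncpg://"),
   ("postgresql+psycopg://", "postgresql+asyncpg://"),
   ("postgresql://", "postgresql+asyncpg://"),
   ("postgres://", "postgresql+asyncpg://")]

def pvLoopA (value : String) : List (String × String) → Option String
  | [] => none
  | (src, tgt) :: rest =>
    if PySem.Str.startswith value src then
      some (tgt ++ PySem.Str.slice value (some (PySem.Str.len src)) none)
    else pvLoopA value rest

def rewrite_database_url_to_asyncpg_py (database_url : String) : Option String :=
  let value := PySem.Str.strip database_url
  if value = "" then none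
  else if PySem.Str.startswith value "postgresql+asyncpg://" then some value
  else pvLoopA value pvReplacements

-- ===== PORT B =====
def pvSchemeMap : PySem.Dict String String :=
  PySem.Dict.ofList
  [("postgresql+psycopg2", "postgresql+asyncpg"),
   ("postgresql+psycopg", "postgresql+asyncpg"),
   ("postgresql", "postgresql+asyncpg"),
   ("postgres", "postgresql+asyncpg"),
   ("postgresql+asyncpg", "postgresql+asyncpg")]

def rewrite_database_url_to_asyncpg_py_alt (database_url : String) : Option String :=
  let value := PySem.Str.strip database_url
  let i := PySem.Str.find value "://"
  if i < 0 then none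
  else
    match PySem.Dict.get? pvSchemeMap (PySem.Str.slice value none (some i)) with
    | none => none
    | some target => some (target ++ "://" ++ PySem.Str.slice value (some (i + 3)) none)

-- ===== PRECONDITION & SPEC =====
def Spec_rewrite_database_url_to_asyncpg_py (database_url : String) (out : Option String) : Prop := out = rewrite_database_url_to_asyncpg_py_alt database_url
instance (database_url : String) (out : Option String) : Decidable (Spec_rewrite_database_url_to_asyncpg_py database_url out) := by unfold Spec_rewrite_database_url_to_asyncpg_py; infer_instance

-- ===== CLAIM (what is proved, stated in full; the proofs are below) =====
def Claim_equal_rewrite_database_url_to_asyncpg_py : Prop := ∀ (database_url : String), Dom_rewrite_database_url_to_asyncpg_py database_url → Spec_rewrite_database_url_to_asyncpg_py database_url (rewrite_database_url_to_asyncpg_py database_url)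

-- ===== LEMMAS AND PROOFS =====

-- If l = s ++ "://" ++ t and the scheme s contains no ':', then find locates "://" at s.length.
theorem pv_pos_case (l s t : List Char) (hs : ':' ∉ s)
    (hl : l = s ++ [':', '/', '/'] ++ t) :
    PySem.Chars.find l [':', '/', '/'] = (s.length : Int) ∧
      l.take s.length = s ∧ l.drop (s.length + 3) = t := by
  have htake : l.take s.length = s := by
    subst hl; rw [List.append_assoc]; exact List.take_left' rfl
  have hdrop : l.drop s.length = [':', '/', '/'] ++ t := by
    subst hl; rw [List.append_assoc]; exact List.drop_left' rfl
  have hdrop3 : l.drop (s.length + 3) = t := by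
    have h3 := congrArg (List.drop 3) hdrop
    simpa [List.drop_drop] using h3
  have hinf : [':', '/', '/'] <:+: l := ⟨s, t, by simpa [List.append_assoc] using hl.symm⟩
  have hpos : 0 ≤ PySem.Chars.find l [':', '/', '/'] := (PySem.Chars.find_nonneg_iff l _).mpr hinf
  obtain ⟨h1, h2⟩ := PySem.Chars.find_spec hpos
  set n := (PySem.Chars.find l [':', '/', '/']).toNat with hn
  have hle : n ≤ s.length := by
    by_contra hgt
    exact h2 s.length (by omega) ⟨t, by rw [hdrop]⟩
  have hge : s.length ≤ n := by
    by_contra hlt'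
    have hlt : n < s.length := by omega
    obtain ⟨u, hu⟩ := h1
    have h0 : (List.drop n l)[0]? = some ':' := by rw [← hu]; rfl
    have hcolon : l[n]? = some ':' := by
      have hd := List.getElem?_drop (xs := l) (i := n) (j := 0)
      rw [h0] at hd
      simpa using hd.symm
    have hsn : l[n]? = some (s[n]'hlt) := by
      subst hl
      rw [List.getElem?_append_left (by simp; omega), List.getElem?_append_left hlt]
      simp [List.getElem?_eq_getElem hlt]
    have : s[n]'hlt = ':' := by
      rw [hsn] at hcolon; exact Option.some.inj hcolon
    exact hs (this ▸ List.getElem_mem hlt)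
  have : n = s.length := le_antisymm hle hge
  refine ⟨?_, htake, hdrop3⟩
  rw [← Int.toNat_of_nonneg hpos, ← hn, this]

-- From find pointing at n, the prefix of l up to n followed by "://" is a prefix of l.
theorem pv_take_prefix (l : List Char)
    (hpos : 0 ≤ PySem.Chars.find l [':', '/', '/']) :
    (l.take (PySem.Chars.find l [':', '/', '/']).toNat ++ [':', '/', '/']) <+: l := by
  obtain ⟨h1, -⟩ := PySem.Chars.find_spec hpos
  obtain ⟨t, ht⟩ := h1
  exact ⟨t, by rw [List.append_assoc, ht, List.take_append_drop]⟩

-- ===== VERDICT helper: the main equivalence on an arbitrary (stripped) string =====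

theorem pv_sw_true (value q : String) (h : q.toList <+: value.toList) :
    PySem.Str.startswith value q = true := by
  rw [PySem.Str.startswith_eq]; exact (PySem.Chars.startswith_iff _ _).mpr h

theorem pv_sw_false (value q : String) (h : ¬ q.toList <+: value.toList) :
    PySem.Str.startswith value q = false := by
  rw [PySem.Str.startswith_eq]
  cases hsw : PySem.Chars.startswith value.toList q.toList
  · rfl
  · exact absurd ((PySem.Chars.startswith_iff _ _).mp hsw) h

-- Closed-term facts, proved by evaluation.
theorem pv_sep : ("://" : String).toList = [':', '/', '/'] := by decide
theorem pv_map_eq : pvSchemeMap = ⟨[("postgresql+psycopg2", "postgresql+asyncpg"),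
    ("postgresql+psycopg", "postgresql+asyncpg"),
    ("postgresql", "postgresql+asyncpg"),
    ("postgres", "postgresql+asyncpg"),
    ("postgresql+asyncpg", "postgresql+asyncpg")]⟩ := by decide
theorem pv_split_apg : ("postgresql+asyncpg://" : String).toList
    = ("postgresql+asyncpg" : String).toList ++ [':', '/', '/'] := by decide
theorem pv_split_pg2 : ("postgresql+psycopg2://" : String).toList
    = ("postgresql+psycopg2" : String).toList ++ [':', '/', '/'] := by decide
theorem pv_split_pg : ("postgresql+psycopg://" : String).toList
    = ("postgresql+psycopg" : String).toList ++ [':', '/', '/'] := by decide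
theorem pv_split_pql : ("postgresql://" : String).toList
    = ("postgresql" : String).toList ++ [':', '/', '/'] := by decide
theorem pv_split_pgs : ("postgres://" : String).toList
    = ("postgres" : String).toList ++ [':', '/', '/'] := by decide
theorem pv_chars_apg : ("postgresql+asyncpg" : String).toList = ['p', 'o', 's', 't', 'g', 'r', 'e', 's', 'q', 'l', '+', 'a', 's', 'y', 'n', 'c', 'p', 'g'] := by decide
theorem pv_chars_pg2 : ("postgresql+psycopg2" : String).toList = ['p', 'o', 's', 't', 'g', 'r', 'e', 's', 'q', 'l', '+', 'p', 's', 'y', 'c', 'o', 'p', 'g', '2'] := by decide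
theorem pv_chars_pg : ("postgresql+psycopg" : String).toList = ['p', 'o', 's', 't', 'g', 'r', 'e', 's', 'q', 'l', '+', 'p', 's', 'y', 'c', 'o', 'p', 'g'] := by decide
theorem pv_chars_pql : ("postgresql" : String).toList = ['p', 'o', 's', 't', 'g', 'r', 'e', 's', 'q', 'l'] := by decide
theorem pv_chars_pgs : ("postgres" : String).toList = ['p', 'o', 's', 't', 'g', 'r', 'e', 's'] := by decide
theorem pv_nc_apg : (':' : Char) ∉ ("postgresql+asyncpg" : String).toList := by rw [pv_chars_apg]; decide
theorem pv_nc_pg2 : (':' : Char) ∉ ("postgresql+psycopg2" : String).toList := by rw [pv_chars_pg2]; decide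
theorem pv_nc_pg : (':' : Char) ∉ ("postgresql+psycopg" : String).toList := by rw [pv_chars_pg]; decide
theorem pv_nc_pql : (':' : Char) ∉ ("postgresql" : String).toList := by rw [pv_chars_pql]; decide
theorem pv_nc_pgs : (':' : Char) ∉ ("postgres" : String).toList := by rw [pv_chars_pgs]; decide
theorem pv_len_apg : ("postgresql+asyncpg" : String).toList.length = 18 := by decide
theorem pv_len_pg2 : ("postgresql+psycopg2" : String).toList.length = 19 := by decide
theorem pv_len_pg : ("postgresql+psycopg" : String).toList.length = 18 := by decide
theorem pv_len_pql : ("postgresql" : String).toList.length = 10 := by decide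
theorem pv_len_pgs : ("postgres" : String).toList.length = 8 := by decide
theorem pv_srclen_pg2 : PySem.Str.len "postgresql+psycopg2://" = ((19 : Nat) : Int) + 3 := by decide
theorem pv_srclen_pg : PySem.Str.len "postgresql+psycopg://" = ((18 : Nat) : Int) + 3 := by decide
theorem pv_srclen_pql : PySem.Str.len "postgresql://" = ((10 : Nat) : Int) + 3 := by decide
theorem pv_srclen_pgs : PySem.Str.len "postgres://" = ((8 : Nat) : Int) + 3 := by decide
theorem pv_empty_eq :
    (if ("" : String) = "" then (none : Option String)
     else if PySem.Str.startswith "" "postgresql+asyncpg://" then some ""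
     else pvLoopA "" pvReplacements) =
    (if PySem.Str.find "" "://" < 0 then none
     else
       match PySem.Dict.get? pvSchemeMap (PySem.Str.slice "" none (some (PySem.Str.find "" "://"))) with
       | none => none
       | some target => some (target ++ "://" ++ PySem.Str.slice "" (some (PySem.Str.find "" "://" + 3)) none)) := by
  decide

-- String-level consequences of "value = key ++ '://' ++ t" for a colon-free key.
theorem pv_scheme_facts (value key : String) (n : Nat) (t : List Char)
    (hnocolon : ':' ∉ key.toList)
    (hlen : key.toList.length = n)
    (hl : value.toList = key.toList ++ [':', '/', '/'] ++ t) :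
    PySem.Str.find value "://" = (n : Int) ∧
      PySem.Str.slice value none (some (n : Int)) = key ∧
      (PySem.Str.slice value (some ((n : Int) + 3)) none).toList = t ∧
      ¬ value = "" := by
  obtain ⟨hf, htk, hd⟩ := pv_pos_case value.toList key.toList t hnocolon hl
  refine ⟨?_, ?_, ?_, ?_⟩
  · rw [PySem.Str.find_eq, pv_sep, hf, hlen]
  · apply String.toList_inj.mp
    rw [PySem.Str.toList_slice, PySem.Chars.slice_eq_listSlice,
      PySem.List.slice_to value.toList (by exact_mod_cast Nat.zero_le n)]
    simpa [hlen] using htk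
  · rw [PySem.Str.toList_slice, PySem.Chars.slice_eq_listSlice,
      PySem.List.slice_from value.toList (by omega)]
    rw [show ((n : Int) + 3).toNat = n + 3 from by omega, ← hlen]
    exact hd
  · intro he
    rw [he] at hl
    simpa using congrArg List.length hl

set_option maxRecDepth 8192 in
theorem pv_body_eq (value : String) :
    (if value = "" then none
     else if PySem.Str.startswith value "postgresql+asyncpg://" then some value
     else pvLoopA value pvReplacements) =
    (if PySem.Str.find value "://" < 0 then none
     else
       match PySem.Dict.get? pvSchemeMap (PySem.Str.slice value none (some (PySem.Str.find value "://"))) with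
       | none => none
       | some target => some (target ++ "://" ++ PySem.Str.slice value (some (PySem.Str.find value "://" + 3)) none)) := by
  have hsep := pv_sep
  have hmap := pv_map_eq
  by_cases h0 : ("postgresql+asyncpg://" : String).toList <+: value.toList
  · -- already asyncpg: A passes the value through, B rebuilds it
    obtain ⟨t, ht⟩ := h0
    have hl : value.toList = ("postgresql+asyncpg" : String).toList ++ [':', '/', '/'] ++ t := by
      rw [← ht, pv_split_apg]
    obtain ⟨hf, hs, hd, hne⟩ := pv_scheme_facts value "postgresql+asyncpg" 18 t pv_nc_apg pv_len_apg hl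
    rw [if_neg hne, if_pos (pv_sw_true value _ ⟨t, ht⟩), hf, if_neg (by omega), hs, hmap]
    refine congrArg some (String.toList_inj.mp ?_)
    simp only [String.toList_append, hsep, hd]
    simpa using hl
  by_cases h1 : ("postgresql+psycopg2://" : String).toList <+: value.toList
  · obtain ⟨t, ht⟩ := h1
    have hl : value.toList = ("postgresql+psycopg2" : String).toList ++ [':', '/', '/'] ++ t := by
      rw [← ht, pv_split_pg2]
    obtain ⟨hf, hs, hd, hne⟩ := pv_scheme_facts value "postgresql+psycopg2" 19 t pv_nc_pg2 pv_len_pg2 hl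
    rw [if_neg hne, if_neg (by rw [pv_sw_false value _ h0]; exact Bool.false_ne_true), hf,
      if_neg (by omega), hs, hmap]
    simp only [pvLoopA, pvReplacements, pv_sw_true value _ ⟨t, ht⟩, if_true]
    refine congrArg some (String.toList_inj.mp ?_)
    simp only [String.toList_append, hsep]
    rw [pv_srclen_pg2,
      pv_split_apg,
      List.append_assoc]
  by_cases h2 : ("postgresql+psycopg://" : String).toList <+: value.toList
  · obtain ⟨t, ht⟩ := h2
    have hl : value.toList = ("postgresql+psycopg" : String).toList ++ [':', '/', '/'] ++ t := by
      rw [← ht, pv_split_pg]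
    obtain ⟨hf, hs, hd, hne⟩ := pv_scheme_facts value "postgresql+psycopg" 18 t pv_nc_pg pv_len_pg hl
    rw [if_neg hne, if_neg (by rw [pv_sw_false value _ h0]; exact Bool.false_ne_true), hf,
      if_neg (by omega), hs, hmap]
    simp only [pvLoopA, pvReplacements, pv_sw_true value _ ⟨t, ht⟩, if_true,
      pv_sw_false value _ h1, if_false, Bool.false_eq_true]
    refine congrArg some (String.toList_inj.mp ?_)
    simp only [String.toList_append, hsep]
    rw [pv_srclen_pg,
      pv_split_apg,
      List.append_assoc]
  by_cases h3 : ("postgresql://" : String).toList <+: value.toList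
  · obtain ⟨t, ht⟩ := h3
    have hl : value.toList = ("postgresql" : String).toList ++ [':', '/', '/'] ++ t := by
      rw [← ht, pv_split_pql]
    obtain ⟨hf, hs, hd, hne⟩ := pv_scheme_facts value "postgresql" 10 t pv_nc_pql pv_len_pql hl
    rw [if_neg hne, if_neg (by rw [pv_sw_false value _ h0]; exact Bool.false_ne_true), hf,
      if_neg (by omega), hs, hmap]
    simp only [pvLoopA, pvReplacements, pv_sw_true value _ ⟨t, ht⟩, if_true,
      pv_sw_false value _ h1, pv_sw_false value _ h2, if_false, Bool.false_eq_true]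
    refine congrArg some (String.toList_inj.mp ?_)
    simp only [String.toList_append, hsep]
    rw [pv_srclen_pql,
      pv_split_apg,
      List.append_assoc]
  by_cases h4 : ("postgres://" : String).toList <+: value.toList
  · obtain ⟨t, ht⟩ := h4
    have hl : value.toList = ("postgres" : String).toList ++ [':', '/', '/'] ++ t := by
      rw [← ht, pv_split_pgs]
    obtain ⟨hf, hs, hd, hne⟩ := pv_scheme_facts value "postgres" 8 t pv_nc_pgs pv_len_pgs hl
    rw [if_neg hne, if_neg (by rw [pv_sw_false value _ h0]; exact Bool.false_ne_true), hf,
      if_neg (by omega), hs, hmap]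
    simp only [pvLoopA, pvReplacements, pv_sw_true value _ ⟨t, ht⟩, if_true,
      pv_sw_false value _ h1, pv_sw_false value _ h2, pv_sw_false value _ h3,
      if_false, Bool.false_eq_true]
    refine congrArg some (String.toList_inj.mp ?_)
    simp only [String.toList_append, hsep]
    rw [pv_srclen_pgs,
      pv_split_apg,
      List.append_assoc]
  · -- no accepted scheme prefix: both sides return none
    by_cases hv : value = ""
    · subst hv; exact pv_empty_eq
    rw [if_neg hv, if_neg (by rw [pv_sw_false value _ h0]; exact Bool.false_ne_true)]
    simp only [pvLoopA, pvReplacements, pv_sw_false value _ h1, pv_sw_false value _ h2,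
      pv_sw_false value _ h3, pv_sw_false value _ h4, if_false, Bool.false_eq_true]
    by_cases hneg : PySem.Str.find value "://" < 0
    · rw [if_pos hneg]
    rw [if_neg hneg]
    have hFc : PySem.Str.find value "://" = PySem.Chars.find value.toList [':', '/', '/'] := by
      rw [PySem.Str.find_eq, hsep]
    have hpos : 0 ≤ PySem.Chars.find value.toList [':', '/', '/'] := by omega
    rcases hget : PySem.Dict.get? pvSchemeMap
        (PySem.Str.slice value none (some (PySem.Str.find value "://"))) with _ | target
    · rfl
    exfalso
    have hwtake : (PySem.Str.slice value none (some (PySem.Str.find value "://"))).toList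
        = value.toList.take (PySem.Chars.find value.toList [':', '/', '/']).toNat := by
      rw [PySem.Str.toList_slice, PySem.Chars.slice_eq_listSlice, hFc,
        PySem.List.slice_to value.toList hpos]
    have hpref := pv_take_prefix value.toList hpos
    rw [← hwtake] at hpref
    set w := PySem.Str.slice value none (some (PySem.Str.find value "://")) with hw
    by_cases k1 : w = "postgresql+psycopg2"
    · rw [k1] at hpref
      exact h1 (by rw [pv_split_pg2]; exact hpref)
    by_cases k2 : w = "postgresql+psycopg"
    · rw [k2] at hpref
      exact h2 (by rw [pv_split_pg]; exact hpref)
    by_cases k3 : w = "postgresql"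
    · rw [k3] at hpref
      exact h3 (by rw [pv_split_pql]; exact hpref)
    by_cases k4 : w = "postgres"
    · rw [k4] at hpref
      exact h4 (by rw [pv_split_pgs]; exact hpref)
    by_cases k5 : w = "postgresql+asyncpg"
    · rw [k5] at hpref
      exact h0 (by rw [pv_split_apg]; exact hpref)
    · rw [hmap] at hget
      simp [PySem.Dict.get?, beq_iff_eq,
        Ne.symm k1, Ne.symm k2, Ne.symm k3, Ne.symm k4, Ne.symm k5] at hget

theorem rewrite_database_url_to_asyncpg_py_spec : Claim_equal_rewrite_database_url_to_asyncpg_py := by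
  intro database_url _
  unfold Spec_rewrite_database_url_to_asyncpg_py
  unfold rewrite_database_url_to_asyncpg_py rewrite_database_url_to_asyncpg_py_alt
  exact pv_body_eq (PySem.Str.strip database_url)
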